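-- pv_equiv track=rewrite | github.com/gabriellaec/desoft-analise-exercicios | backup/user_292/ch84_2020_04_12_23_29_08_591940.py | inverte_dicionario
-- ===== SOURCE A (Python) =====
-- def inverte_dicionario(dic):
--     q = {}
--     for n,i in dic.items():
--         if i not in q:
--             q[i] = n
--         else:
--             q[i] = q[i] + n
--     return q
-- ===== SOURCE B (Python) =====
-- def inverte_dicionario(dic):
--     items = list(dic.items())
--     valores = []
--     for _, v in items:
--         if v not in valores:
--             valores.append(v)
--     return {v: "".join(k for k, vv in items if vv == v) for v in valores}
-- ===== Notes on version B (the rewrite author's own statement) =====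
-- stated objective: alternative
-- what changed: B drops A's incremental dict with in-place string concatenation entirely: it first collects the distinct values in first-occurrence order, then for each value rescans the items and joins all its keys, a nested-scan staged algorithm instead of A's single accumulating pass.
import Mathlib
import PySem

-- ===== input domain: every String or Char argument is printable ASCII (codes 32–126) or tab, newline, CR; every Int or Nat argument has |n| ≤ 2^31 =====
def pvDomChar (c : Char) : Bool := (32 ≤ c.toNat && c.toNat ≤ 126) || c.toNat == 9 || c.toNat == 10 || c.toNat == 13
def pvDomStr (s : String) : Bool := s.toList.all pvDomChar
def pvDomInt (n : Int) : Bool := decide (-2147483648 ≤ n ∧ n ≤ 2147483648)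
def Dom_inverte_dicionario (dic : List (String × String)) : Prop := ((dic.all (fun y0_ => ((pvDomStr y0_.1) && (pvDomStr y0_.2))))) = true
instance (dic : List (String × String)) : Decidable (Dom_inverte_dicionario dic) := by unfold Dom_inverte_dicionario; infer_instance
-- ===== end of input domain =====

-- B replaces A's single accumulating pass (dict with in-place string concatenation) by a staged
-- nested-scan algorithm: collect distinct values in first-occurrence order, then rescan per value
-- and join its keys; same result, alternative algorithm (not faster).


-- ===== PORT A =====
def inverte_dicionario (dic : List (String × String)) : List (String × String) :=
  (dic.foldl
    (fun q p =>
      if q.contains p.2 = false then q.insert p.2 p.1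
      else q.insert p.2 (q.getD p.2 "" ++ p.1))
    PySem.Dict.empty).items

-- ===== PORT B =====
def inverte_dicionario_alt (dic : List (String × String)) : List (String × String) :=
  let valores : List String :=
    dic.foldl (fun acc p => if acc.contains p.2 then acc else acc ++ [p.2]) []
  valores.map (fun v => (v, PySem.Str.join "" ((dic.filter (fun p => p.2 == v)).map (·.1))))

-- ===== PRECONDITION & SPEC =====
def Spec_inverte_dicionario (dic : List (String × String)) (out : List (String × String)) : Prop := out = inverte_dicionario_alt dic
instance (dic : List (String × String)) (out : List (String × String)) : Decidable (Spec_inverte_dicionario dic out) := by unfold Spec_inverte_dicionario; infer_instance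

-- ===== CLAIM =====
def Claim_equal_inverte_dicionario : Prop := ∀ (dic : List (String × String)), Dom_inverte_dicionario dic → Spec_inverte_dicionario dic (inverte_dicionario dic)

-- ===== LEMMAS AND PROOFS =====

theorem flatten_intersperse_nil (xss : List (List Char)) :
    (List.intersperse [] xss).flatten = xss.flatten := by
  induction xss with
  | nil => rfl
  | cons x xss ih =>
    cases xss with
    | nil => rfl
    | cons y yss =>
      simp only [List.intersperse, List.flatten_cons, List.nil_append] at *
      simp [ih]

theorem joinS_nil : PySem.Str.join "" [] = "" := rfl

theorem joinS_cons (s : String) (ss : List String) :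
    PySem.Str.join "" (s :: ss) = s ++ PySem.Str.join "" ss := by
  rw [← String.toList_inj]
  simp [PySem.Str.toList_join, PySem.Chars.join, List.intercalate, flatten_intersperse_nil]

-- A's branch on membership is one uniform insert: when the key is absent, getD is the default "".
theorem stepA_eq_insert (q : PySem.Dict String String) (p : String × String) :
    (if q.contains p.2 = false then q.insert p.2 p.1
     else q.insert p.2 (q.getD p.2 "" ++ p.1)) =
      q.insert p.2 (q.getD p.2 "" ++ p.1) := by
  cases h : q.contains p.2 with
  | false => simp [PySem.Dict.getD_of_not_contains q "" h]
  | true => simp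

theorem getD_foldA (l : List (String × String)) (q : PySem.Dict String String) (v : String) :
    (l.foldl (fun d p => d.insert p.2 (d.getD p.2 "" ++ p.1)) q).getD v "" =
      q.getD v "" ++ PySem.Str.join "" ((l.filter (fun p => p.2 == v)).map (·.1)) := by
  induction l generalizing q with
  | nil => simp [joinS_nil]
  | cons p l ih =>
    simp only [List.foldl_cons, ih, List.filter_cons]
    by_cases hv : p.2 = v
    · simp [hv, joinS_cons, String.append_assoc]
    · have hb : (p.2 == v) = false := by simp [hv]
      have hv' : ¬(v = p.2) := fun h => hv h.symm
      simp [hb, PySem.Dict.getD_insert, hv']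

-- B's distinct-values loop is exactly Set.update [] over the value column.
theorem valores_eq_set_update (dic : List (String × String)) :
    dic.foldl (fun acc p => if acc.contains p.2 then acc else acc ++ [p.2]) ([] : List String) =
      PySem.Set.update [] (dic.map (·.2)) := by
  rw [PySem.Set.update, List.foldl_map]
  rfl

theorem inverte_dicionario_spec' (dic : List (String × String)) :
    inverte_dicionario dic = inverte_dicionario_alt dic := by
  have hfun : (fun (q : PySem.Dict String String) (p : String × String) =>
      if q.contains p.2 = false then q.insert p.2 p.1
      else q.insert p.2 (q.getD p.2 "" ++ p.1)) =
      (fun q p => q.insert p.2 (q.getD p.2 "" ++ p.1)) :=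
    funext fun q => funext fun p => stepA_eq_insert q p
  have hA : inverte_dicionario dic
      = (dic.foldl (fun (q : PySem.Dict String String) p => q.insert p.2 (q.getD p.2 "" ++ p.1)) PySem.Dict.empty).items := by
    unfold inverte_dicionario; rw [hfun]
  rw [hA]
  set qA := dic.foldl (fun (q : PySem.Dict String String) p => q.insert p.2 (q.getD p.2 "" ++ p.1)) PySem.Dict.empty with hqA
  have hndA : qA.keys.Nodup := by
    rw [hqA]
    exact PySem.Dict.nodup_keys_foldl_insert_key dic (fun p => p.2) _ _ PySem.Dict.nodup_keys_empty
  have hkeys : qA.keys = PySem.Set.update [] (dic.map (·.2)) := by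
    rw [hqA, PySem.Dict.keys_foldl_insert_key dic (fun p => p.2)]
    rfl
  rw [PySem.Dict.items_eq_map_keys qA hndA "", hkeys]
  unfold inverte_dicionario_alt
  rw [valores_eq_set_update]
  refine List.map_congr_left fun v _ => ?_
  rw [hqA, getD_foldA]
  simp [PySem.Dict.getD_empty]

-- ===== VERDICT =====
theorem inverte_dicionario_spec : Claim_equal_inverte_dicionario := by
  intro dic _
  exact inverte_dicionario_spec' dic
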